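-- pv_equiv track=rewrite | github.com/jsbien/early_fonts_inventory | tools/obsolete/segment_character_table.py | calculate_cutlines_locations
-- ===== SOURCE A (Python) =====
-- def calculate_cutlines_locations(sums):
--     element_strips = []
--     cutoff = 0
--
--     if len(sums) == 0:
--         return []
--     if sums[0] <= cutoff:
--         background_strip = True
--     else:
--         background_strip = False
--     strip_start = 0
--
--     for i in range(len(sums)):
--         if sums[i] <= cutoff:
--             background = True
--         else:
--             background = False
--         if background == background_strip:
--             continue
--
--         # We crossed a region.
--         if background:
--            strip_end = i-1;
--            element_strips.append((strip_start, strip_end))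
--         strip_start = i
--         background_strip = background
--
--     if strip_start < len(sums) and not background_strip:
--         strip_end = len(sums) - 1
--         element_strips.append((strip_start, strip_end))
--     return element_strips
-- ===== SOURCE B (Python) =====
-- def calculate_cutlines_locations(sums):
--     # Skip background positions; on a foreground position scan to the end of
--     # its run, emit the run's interval, and resume after it.
--     res = []
--     n = len(sums)
--     i = 0
--     while i < n:
--         if sums[i] <= 0:
--             i += 1
--         else:
--             j = i + 1
--             while j < n and sums[j] > 0:
--                 j += 1
--             res.append((i, j - 1))
--             i = j
--     return res
-- ===== Notes on version B (the rewrite author's own statement) =====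
-- stated objective: simpler
-- what changed: Replaced A's background/foreground state machine (flag initialized from sums[0], transition detection, trailing flush) by a run-skipping scan: skip background positions, and at each foreground position consume the whole run at once and emit its interval directly.
import Mathlib
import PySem

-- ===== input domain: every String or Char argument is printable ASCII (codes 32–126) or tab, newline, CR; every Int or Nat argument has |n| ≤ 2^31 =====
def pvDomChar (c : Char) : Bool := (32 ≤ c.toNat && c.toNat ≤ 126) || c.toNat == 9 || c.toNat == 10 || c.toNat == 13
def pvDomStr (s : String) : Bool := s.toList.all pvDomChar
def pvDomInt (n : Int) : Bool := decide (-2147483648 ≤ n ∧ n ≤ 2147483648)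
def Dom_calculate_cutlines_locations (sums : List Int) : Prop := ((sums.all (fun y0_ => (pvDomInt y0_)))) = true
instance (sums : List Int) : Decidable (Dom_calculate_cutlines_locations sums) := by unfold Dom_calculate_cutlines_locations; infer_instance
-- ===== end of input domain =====

-- B replaces A's background/foreground flag state machine by a run-skipping scan
-- (skip background positions, consume each foreground run at once); simpler, same cost.

-- ===== PORT A =====
-- the loop body of A: state (element_strips, background_strip, strip_start), input (i, sums[i])
def pvStepA (st : List (Int × Int) × Bool × Int) (p : Int × Int) : List (Int × Int) × Bool × Int :=
  let background := decide (p.2 ≤ 0)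
  if background = st.2.1 then st
  else ((if background then st.1 ++ [(st.2.2, p.1 - 1)] else st.1), background, p.1)

-- the code after A's loop: the trailing flush of an open foreground strip
def pvFinishA (n : Int) (st : List (Int × Int) × Bool × Int) : List (Int × Int) :=
  if st.2.2 < n ∧ st.2.1 = false then st.1 ++ [(st.2.2, n - 1)] else st.1

def calculate_cutlines_locations (sums : List Int) : List (Int × Int) :=
  if sums.length = 0 then []
  else
    let background_strip := decide (PySem.List.pyGetD sums 0 0 ≤ 0)
    let st := (PySem.List.pyRange 0 (sums.length : Int) 1).foldl
      (fun st i => pvStepA st (i, PySem.List.pyGetD sums i 0))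
      ([], background_strip, (0 : Int))
    pvFinishA (sums.length : Int) st

-- ===== PORT B =====
-- B's outer while loop: at a foreground position, the inner scan 'while j < n and
-- sums[j] > 0: j += 1' is the takeWhile/dropWhile of the remaining list.
def pvAltGo (xs : List Int) (i : Int) : List (Int × Int) :=
  match xs with
  | [] => []
  | x :: rest =>
    if x ≤ 0 then pvAltGo rest (i + 1)
    else
      let t := rest.takeWhile (fun y => decide (0 < y))
      let r := rest.dropWhile (fun y => decide (0 < y))
      (i, i + t.length) :: pvAltGo r (i + t.length + 1)
termination_by xs.length
decreasing_by
  all_goals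
    have h := List.length_dropWhile_le (fun y => decide (0 < y)) rest
    simp only [List.length_cons]
    omega

def calculate_cutlines_locations_alt (sums : List Int) : List (Int × Int) :=
  pvAltGo sums 0

-- ===== PRECONDITION & SPEC =====
def Spec_calculate_cutlines_locations (sums : List Int) (out : List (Int × Int)) : Prop := out = calculate_cutlines_locations_alt sums
instance (sums : List Int) (out : List (Int × Int)) : Decidable (Spec_calculate_cutlines_locations sums out) := by unfold Spec_calculate_cutlines_locations; infer_instance

-- ===== CLAIM (what is proved, stated in full; the proofs are below) =====
def Claim_equal_calculate_cutlines_locations : Prop := ∀ (sums : List Int), Dom_calculate_cutlines_locations sums → Spec_calculate_cutlines_locations sums (calculate_cutlines_locations sums)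

-- ===== LEMMAS AND PROOFS =====

-- invariant of A's loop, stated over the suffix still to be processed:
-- in background state the remaining loop+flush produce exactly B's runs of the suffix;
-- in foreground state (run open since ss < i) they first close that run.
theorem pv_key (xs : List Int) : ∀ (i : Int) (strips : List (Int × Int)) (ss : Int),
    (pvFinishA (i + xs.length) ((PySem.List.enumerate xs i).foldl pvStepA (strips, true, ss))
      = strips ++ pvAltGo xs i)
    ∧ (ss < i →
      pvFinishA (i + xs.length) ((PySem.List.enumerate xs i).foldl pvStepA (strips, false, ss))
        = strips ++ (ss, i + ((xs.takeWhile (fun y => decide (0 < y))).length : Int) - 1)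
            :: pvAltGo (xs.dropWhile (fun y => decide (0 < y)))
                 (i + ((xs.takeWhile (fun y => decide (0 < y))).length : Int))) := by
  induction xs with
  | nil =>
    intro i strips ss
    constructor
    · simp [PySem.List.enumerate, pvFinishA, pvAltGo]
    · intro hss
      simp only [PySem.List.enumerate, List.foldl_nil, List.length_nil, List.takeWhile_nil,
        List.dropWhile_nil, pvFinishA, pvAltGo]
      simp [hss]
  | cons x rest ih =>
    intro i strips ss
    constructor
    · -- background state
      rw [PySem.List.enumerate_cons, List.foldl_cons]
      by_cases hx : x ≤ 0
      · have hstep : pvStepA (strips, true, ss) (i, x) = (strips, true, ss) := by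
          simp [pvStepA, hx]
        rw [hstep]
        have := (ih (i + 1) strips ss).1
        simp only [List.length_cons] at *
        rw [show (i + (rest.length + 1 : Nat)) = (i + 1 + (rest.length : Int)) by push_cast; ring]
        rw [this]
        rw [show pvAltGo (x :: rest) i = pvAltGo rest (i + 1) by rw [pvAltGo]; simp [hx]]
      · have hstep : pvStepA (strips, true, ss) (i, x) = (strips, false, i) := by
          simp [pvStepA, hx]
        rw [hstep]
        have := (ih (i + 1) strips i).2 (by omega)
        simp only [List.length_cons] at *
        rw [show (i + (rest.length + 1 : Nat)) = (i + 1 + (rest.length : Int)) by push_cast; ring]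
        rw [this]
        rw [show pvAltGo (x :: rest) i
            = (i, i + ((rest.takeWhile (fun y => decide (0 < y))).length : Int))
              :: pvAltGo (rest.dropWhile (fun y => decide (0 < y)))
                   (i + ((rest.takeWhile (fun y => decide (0 < y))).length : Int) + 1) by
          rw [pvAltGo]; simp [hx]]
        ring_nf
    · -- foreground state, run open since ss
      intro hss
      rw [PySem.List.enumerate_cons, List.foldl_cons]
      by_cases hx : x ≤ 0
      · have hstep : pvStepA (strips, false, ss) (i, x) = (strips ++ [(ss, i - 1)], true, i) := by
          simp [pvStepA, hx]
        rw [hstep]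
        have := (ih (i + 1) (strips ++ [(ss, i - 1)]) i).1
        simp only [List.length_cons] at *
        rw [show (i + (rest.length + 1 : Nat)) = (i + 1 + (rest.length : Int)) by push_cast; ring]
        rw [this]
        have htw : (x :: rest).takeWhile (fun y => decide (0 < y)) = [] := by
          simp [List.takeWhile_cons]; omega
        have hdw : (x :: rest).dropWhile (fun y => decide (0 < y)) = x :: rest := by
          simp [List.dropWhile_cons]; omega
        rw [htw, hdw]
        simp only [List.length_nil, Nat.cast_zero, add_zero]
        rw [show pvAltGo (x :: rest) i = pvAltGo rest (i + 1) by rw [pvAltGo]; simp [hx]]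
        simp
      · have hstep : pvStepA (strips, false, ss) (i, x) = (strips, false, ss) := by
          simp [pvStepA, hx]
        rw [hstep]
        have := (ih (i + 1) strips ss).2 (by omega)
        simp only [List.length_cons] at *
        rw [show (i + (rest.length + 1 : Nat)) = (i + 1 + (rest.length : Int)) by push_cast; ring]
        rw [this]
        have htw : (x :: rest).takeWhile (fun y => decide (0 < y))
            = x :: rest.takeWhile (fun y => decide (0 < y)) := by
          simp [List.takeWhile_cons]; omega
        have hdw : (x :: rest).dropWhile (fun y => decide (0 < y))
            = rest.dropWhile (fun y => decide (0 < y)) := by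
          simp [List.dropWhile_cons]; omega
        rw [htw, hdw]
        simp only [List.length_cons]
        push_cast
        ring_nf

-- ===== VERDICT (by name: the statement is the Claim_ definition above) =====
theorem calculate_cutlines_locations_spec : Claim_equal_calculate_cutlines_locations := by
  intro sums _
  unfold Spec_calculate_cutlines_locations
  match sums with
  | [] => simp [calculate_cutlines_locations, calculate_cutlines_locations_alt, pvAltGo]
  | x :: rest =>
    unfold calculate_cutlines_locations calculate_cutlines_locations_alt
    rw [if_neg (by simp)]
    dsimp only
    rw [← List.foldl_map]
    rw [show ((((x :: rest).length : Nat) : Int)) = PySem.List.len (x :: rest) from rfl]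
    rw [← PySem.List.enumerate_eq_map_pyRange (x :: rest) 0]
    rw [show PySem.List.enumerate (x :: rest) = PySem.List.enumerate (x :: rest) 0 from rfl]
    rw [PySem.List.enumerate_cons, List.foldl_cons]
    rw [show PySem.List.pyGetD (x :: rest) 0 0 = x from by simp [pysem]]
    rw [show pvStepA ([], decide (x ≤ 0), (0 : Int)) ((0 : Int), x) = ([], decide (x ≤ 0), (0 : Int)) from by simp [pvStepA]]
    rw [show PySem.List.len (x :: rest) = 1 + (rest.length : Int) from by simp [pysem]; ring]
    rw [zero_add]
    by_cases hx : x ≤ 0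
    · rw [show (decide (x ≤ 0)) = true from by simp [hx]]
      rw [(pv_key rest 1 [] 0).1]
      rw [show pvAltGo (x :: rest) 0 = pvAltGo rest 1 from by rw [pvAltGo]; simp [hx]]
      simp
    · rw [show (decide (x ≤ 0)) = false from by simp [hx]]
      rw [(pv_key rest 1 [] 0).2 (by omega)]
      rw [show pvAltGo (x :: rest) 0
          = (0, (0 : Int) + ((rest.takeWhile (fun y => decide (0 < y))).length : Int))
            :: pvAltGo (rest.dropWhile (fun y => decide (0 < y)))
                 ((0 : Int) + ((rest.takeWhile (fun y => decide (0 < y))).length : Int) + 1) from by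
        rw [pvAltGo]; simp [hx]]
      simp only [List.nil_append, zero_add]
      ring_nf
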